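-- pv_equiv track=rewrite | github.com/miliar/Code_Jam_Webscraper | solutions_python/Problem_201/2898.py | OccupyStall
-- ===== SOURCE A (Python) =====
-- def OccupyStall (stalls,index):
--     _,Ls,Rs = stalls[index]
--     stalls[index] = True,Ls,Rs
--     ret = []
--     for i in range(len(stalls)):
--         state,Ls,Rs = stalls[i]
--         if i < index:
--             Rs = min (Rs,index-i-1)
--         elif i > index:
--             Ls = min (Ls,i-index-1)
--         if i==index:
--             state = True
--         ret.append ((state,Ls,Rs))
--     return ret
-- ===== SOURCE B (Python) =====
-- def OccupyStall(stalls, index):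
--     _, Ls, Rs = stalls[index]
--     stalls[index] = True, Ls, Rs
--     # Walk OUTWARD from the occupied stall with an explicit distance counter,
--     # building the left part back-to-front, instead of A's forward indexed
--     # loop that branches per element and recomputes the distance from indices.
--     left_rev = []
--     i, dist = index - 1, 0
--     while i >= 0:
--         s, l, r = stalls[i]
--         left_rev.append((s, l, min(r, dist)))
--         i -= 1
--         dist += 1
--     right = []
--     i, dist = index + 1, 0
--     while i < len(stalls):
--         s, l, r = stalls[i]
--         right.append((s, min(l, dist), r))
--         i += 1
--         dist += 1
--     left_rev.reverse()
--     return left_rev + [(True, Ls, Rs)] + right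
-- ===== Notes on version B (the rewrite author's own statement) =====
-- stated objective: alternative
-- what changed: B walks OUTWARD from the occupied stall with two while-loops carrying an explicit distance counter (left part built back-to-front and reversed), instead of A's single forward indexed loop that branches i<index/elif/i==index and recomputes each distance from the indices.
-- outside the precondition, e.g. on OccupyStall([(True, 0, 0)], -1): A returns [(True, 0, 0)], B returns [(True, 0, 0), (True, 0, 0)]
import Mathlib
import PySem

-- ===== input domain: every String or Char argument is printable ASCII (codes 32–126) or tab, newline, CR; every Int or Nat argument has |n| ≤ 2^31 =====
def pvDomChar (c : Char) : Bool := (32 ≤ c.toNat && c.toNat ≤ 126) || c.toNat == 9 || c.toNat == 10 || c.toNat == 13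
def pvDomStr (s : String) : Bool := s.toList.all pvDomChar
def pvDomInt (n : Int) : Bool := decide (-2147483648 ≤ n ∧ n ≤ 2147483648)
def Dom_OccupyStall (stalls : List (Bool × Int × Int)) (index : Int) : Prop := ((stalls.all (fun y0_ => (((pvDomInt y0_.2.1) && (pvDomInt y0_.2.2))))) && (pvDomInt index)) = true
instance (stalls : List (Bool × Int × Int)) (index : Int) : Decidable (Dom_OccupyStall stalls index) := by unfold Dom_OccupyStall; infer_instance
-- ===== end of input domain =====

-- B walks outward from the occupied stall with an explicit distance counter (left part built
-- back-to-front and reversed) instead of A's forward indexed loop branching on every element;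
-- equivalence is about the RETURN value (both Pythons also mutate stalls[index] identically).

-- ===== PORT A =====
def OccupyStall (stalls : List (Bool × Int × Int)) (index : Int) : List (Bool × Int × Int) :=
  match PySem.List.pyGet? stalls index with
  | none => []  -- Python raises IndexError here; excluded by Pre_
  | some (_, ls, rs) =>
    let stalls' := PySem.List.pySetD stalls index (true, ls, rs)
    (List.range stalls'.length).foldl (fun ret (i : Nat) =>
      let t := PySem.List.pyGetD stalls' (i : Int) (false, 0, 0)
      let state := t.1
      let l := t.2.1
      let r := t.2.2
      let r := if (i : Int) < index then min r (index - (i : Int) - 1) else r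
      let l := if index < (i : Int) then min l ((i : Int) - index - 1) else l
      let state := if (i : Int) = index then true else state
      ret ++ [(state, l, r)]) []

-- ===== PORT B =====
-- the left while-loop of Source B: fuel = number of iterations, i / dist the loop variables
def pvGoL (stalls : List (Bool × Int × Int)) : Nat → Int → Int → List (Bool × Int × Int)
  | 0, _, _ => []
  | f + 1, i, dist =>
    let t := PySem.List.pyGetD stalls i (false, 0, 0)
    (t.1, t.2.1, min t.2.2 dist) :: pvGoL stalls f (i - 1) (dist + 1)

-- the right while-loop of Source B
def pvGoR (stalls : List (Bool × Int × Int)) : Nat → Int → Int → List (Bool × Int × Int)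
  | 0, _, _ => []
  | f + 1, i, dist =>
    let t := PySem.List.pyGetD stalls i (false, 0, 0)
    (t.1, min t.2.1 dist, t.2.2) :: pvGoR stalls f (i + 1) (dist + 1)

def OccupyStall_alt (stalls : List (Bool × Int × Int)) (index : Int) : List (Bool × Int × Int) :=
  match PySem.List.pyGet? stalls index with
  | none => []  -- Python raises IndexError here; excluded by Pre_
  | some (_, ls, rs) =>
    let stalls' := PySem.List.pySetD stalls index (true, ls, rs)
    let leftRev := pvGoL stalls' index.toNat (index - 1) 0
    let right := pvGoR stalls' ((stalls'.length : Int) - (index + 1)).toNat (index + 1) 0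
    leftRev.reverse ++ [(true, ls, rs)] ++ right

-- ===== PRECONDITION & SPEC =====
-- Pre_ excludes out-of-range indices, where A raises IndexError, and negative in-range indices,
-- where A's value (its loop compares the 0-based counter against the raw negative index, so the
-- right-side clamp is applied to every stall including the occupied one) is an accident of Python's
-- index wraparound that B's outward walk cannot and should not reproduce.
def Pre_OccupyStall (stalls : List (Bool × Int × Int)) (index : Int) : Prop :=
  0 ≤ index ∧ index < stalls.length
instance (stalls : List (Bool × Int × Int)) (index : Int) : Decidable (Pre_OccupyStall stalls index) := by
  unfold Pre_OccupyStall; infer_instance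
def pvWitness_OccupyStall : (List (Bool × Int × Int)) × Int :=
  ([(false, 2, 2), (false, 1, 1), (false, 0, 0)], 1)
def Spec_OccupyStall (stalls : List (Bool × Int × Int)) (index : Int) (out : List (Bool × Int × Int)) : Prop := out = OccupyStall_alt stalls index
instance (stalls : List (Bool × Int × Int)) (index : Int) (out : List (Bool × Int × Int)) : Decidable (Spec_OccupyStall stalls index out) := by unfold Spec_OccupyStall; infer_instance

-- ===== CLAIM (what is proved, stated in full; the proofs are below) =====
def Claim_equal_OccupyStall : Prop := ∀ (stalls : List (Bool × Int × Int)) (index : Int), Dom_OccupyStall stalls index → Pre_OccupyStall stalls index → Spec_OccupyStall stalls index (OccupyStall stalls index)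

-- ===== LEMMAS AND PROOFS =====

theorem pvGoL_eq_map (st : List (Bool × Int × Int)) :
    ∀ (m : Nat) (i d : Int), pvGoL st m i d = (List.range m).map (fun k : Nat =>
      let t := PySem.List.pyGetD st (i - k) (false, 0, 0)
      (t.1, t.2.1, min t.2.2 (d + k))) := by
  intro m
  induction m with
  | zero => intro i d; simp [pvGoL]
  | succ m ih =>
    intro i d
    rw [List.range_succ_eq_map, List.map_cons, List.map_map]
    simp only [pvGoL]
    congr 1
    · norm_num
    · rw [ih (i - 1) (d + 1)]
      refine List.map_congr_left fun k _ => ?_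
      simp only [Function.comp_apply]
      have h1 : i - ((k + 1 : Nat) : Int) = i - 1 - (k : Int) := by push_cast; ring
      have h2 : d + ((k + 1 : Nat) : Int) = d + 1 + (k : Int) := by push_cast; ring
      simp only [Nat.succ_eq_add_one, h1, h2]

theorem pvGoR_eq_map (st : List (Bool × Int × Int)) :
    ∀ (m : Nat) (i d : Int), pvGoR st m i d = (List.range m).map (fun k : Nat =>
      let t := PySem.List.pyGetD st (i + k) (false, 0, 0)
      (t.1, min t.2.1 (d + k), t.2.2)) := by
  intro m
  induction m with
  | zero => intro i d; simp [pvGoR]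
  | succ m ih =>
    intro i d
    rw [List.range_succ_eq_map, List.map_cons, List.map_map]
    simp only [pvGoR]
    congr 1
    · norm_num
    · rw [ih (i + 1) (d + 1)]
      refine List.map_congr_left fun k _ => ?_
      simp only [Function.comp_apply]
      have h1 : i + ((k + 1 : Nat) : Int) = i + 1 + (k : Int) := by push_cast; ring
      have h2 : d + ((k + 1 : Nat) : Int) = d + 1 + (k : Int) := by push_cast; ring
      simp only [Nat.succ_eq_add_one, h1, h2]

-- ===== VERDICT (by name: the statement is the Claim_ definition above) =====
theorem OccupyStall_spec : Claim_equal_OccupyStall := by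
  intro stalls index _ hpre
  obtain ⟨h0, hlt⟩ := hpre
  obtain ⟨j, rfl⟩ : ∃ j : Nat, index = (j : Int) := ⟨index.toNat, (Int.toNat_of_nonneg h0).symm⟩
  have hj : j < stalls.length := by exact_mod_cast hlt
  unfold Spec_OccupyStall OccupyStall OccupyStall_alt
  rcases hsj : stalls[j] with ⟨s0, ls, rs⟩
  rw [PySem.List.pyGet?_natCast, List.getElem?_eq_getElem hj, hsj]
  simp only [PySem.List.pySetD_natCast]
  rw [PySem.List.foldl_append_singleton_eq_map, List.nil_append]
  have hlen : (stalls.set j (true, ls, rs)).length = stalls.length := by simp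
  have htn : ((j : Int)).toNat = j := by simp
  have hfr : (((stalls.set j (true, ls, rs)).length : Int) - ((j : Int) + 1)).toNat
      = stalls.length - (j + 1) := by omega
  rw [htn, hfr]
  have hm : stalls.length - (j + 1) + (j + 1) = stalls.length := by omega
  have hr : List.range (stalls.set j (true, ls, rs)).length
      = (List.range j ++ [j]) ++ (List.range (stalls.length - (j + 1))).map (fun k => j + 1 + k) := by
    rw [hlen]
    conv_lhs => rw [show stalls.length = (j + 1) + (stalls.length - (j + 1)) by omega]
    rw [List.range_add, List.range_succ]
  rw [hr, List.map_append, List.map_append, List.map_map]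
  congr 1
  · congr 1
    · -- left region: (range j).map f = leftRev.reverse
      rw [pvGoL_eq_map]
      rw [← List.map_reverse]
      have hrev : (List.range j).reverse = (List.range j).map (fun k => j - 1 - k) := by
        apply List.ext_getElem
        · simp
        · intro i h1 h2
          simp only [List.length_reverse, List.length_range] at h1
          simp only [List.getElem_reverse, List.getElem_map, List.getElem_range, List.length_range]
      rw [hrev, List.map_map]
      refine List.map_congr_left fun k hk => ?_
      have hkj : k < j := List.mem_range.mp hk
      simp only [Function.comp_apply]
      have hc1 : ((k : Nat) : Int) < (j : Int) := by exact_mod_cast hkj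
      rw [if_pos hc1, if_neg (by omega), if_neg (by omega)]
      have h1 : (j : Int) - 1 - ((j - 1 - k : Nat) : Int) = (k : Int) := by omega
      have h2 : (0 : Int) + ((j - 1 - k : Nat) : Int) = (j : Int) - (k : Int) - 1 := by omega
      simp only [h1, h2]
    · -- the occupied middle element
      simp only [List.map_cons, List.map_nil]
      have hjl : j < (stalls.set j (true, ls, rs)).length := by omega
      have hmid : PySem.List.pyGetD (stalls.set j (true, ls, rs)) ((j : Nat) : Int) (false, 0, 0)
          = (true, ls, rs) := by
        rw [PySem.List.pyGetD_natCast, List.getD_eq_getElem _ _ hjl, List.getElem_set_self]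
      simp [hmid]
  · -- right region
    rw [pvGoR_eq_map]
    refine List.map_congr_left fun k hk => ?_
    have hkm : k < stalls.length - (j + 1) := List.mem_range.mp hk
    simp only [Function.comp_apply]
    have hc : (j : Int) < ((j + 1 + k : Nat) : Int) := by push_cast; omega
    rw [if_neg (by push_cast; omega), if_pos hc, if_neg (by push_cast; omega)]
    have h1 : (((j + 1 + k : Nat)) : Int) = (j : Int) + 1 + (k : Int) := by push_cast; ring
    have h3 : (j : Int) + 1 + (k : Int) - (j : Int) - 1 = (0 : Int) + (k : Int) := by ring
    simp only [h1, h3]
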